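-- pv_equiv track=rewrite | github.com/HarshGmail/Hoping-Minds | question22.py | findDifferenceOddEven
-- ===== SOURCE A (Python) =====
-- def findDifferenceOddEven(arr):
--     sum_odd = 0
--     sum_even = 0
--
--     for num in arr:
--         if num % 2 == 0:
--             sum_even += num
--         else:
--             sum_odd += num
--
--     return sum_odd - sum_even
-- ===== SOURCE B (Python) =====
-- def findDifferenceOddEven(arr):
--     # odd_sum - even_sum == total - 2 * even_sum, since total = odd_sum + even_sum
--     total = sum(arr)
--     even_total = sum(x for x in arr if x % 2 == 0)
--     return total - 2 * even_total
-- ===== Notes on version B (the rewrite author's own statement) =====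
-- stated objective: alternative
-- what changed: Uses the arithmetic identity odd_sum - even_sum = total - 2*even_sum: B computes the whole-list sum and the sum of the even elements in two staged passes and combines them, instead of A's single pass maintaining two odd/even accumulators.
import Mathlib
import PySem

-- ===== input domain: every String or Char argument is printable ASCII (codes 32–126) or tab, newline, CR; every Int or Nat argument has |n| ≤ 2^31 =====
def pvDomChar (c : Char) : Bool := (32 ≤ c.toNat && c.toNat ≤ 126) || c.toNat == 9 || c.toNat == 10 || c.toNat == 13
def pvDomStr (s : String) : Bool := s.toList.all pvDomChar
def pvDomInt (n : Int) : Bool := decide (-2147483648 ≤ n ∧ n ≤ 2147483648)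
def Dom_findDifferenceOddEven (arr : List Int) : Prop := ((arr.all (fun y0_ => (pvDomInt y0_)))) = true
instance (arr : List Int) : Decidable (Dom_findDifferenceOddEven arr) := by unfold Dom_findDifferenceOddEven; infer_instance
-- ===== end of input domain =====

-- B computes the same value by the identity odd_sum - even_sum = total - 2*even_sum, in two staged passes (objective: alternative decomposition).

-- ===== PORT A =====
-- literal transliteration: loop maintaining (sum_odd, sum_even); return sum_odd - sum_even
def findDifferenceOddEven (arr : List Int) : Int :=
  let p := arr.foldl
    (fun (s : Int × Int) num =>
      if PySem.Int.mod num 2 == 0 then (s.1, s.2 + num) else (s.1 + num, s.2))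
    (0, 0)
  p.1 - p.2

-- ===== PORT B =====
-- literal transliteration of Source B: total = sum(arr); even_total = sum(x for x in arr if x % 2 == 0); total - 2*even_total
def findDifferenceOddEven_alt (arr : List Int) : Int :=
  let total := arr.sum
  let even_total := (arr.filter (fun x => PySem.Int.mod x 2 == 0)).sum
  total - 2 * even_total

-- ===== PRECONDITION & SPEC =====
def Spec_findDifferenceOddEven (arr : List Int) (out : Int) : Prop := out = findDifferenceOddEven_alt arr
instance (arr : List Int) (out : Int) : Decidable (Spec_findDifferenceOddEven arr out) := by unfold Spec_findDifferenceOddEven; infer_instance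

-- ===== CLAIM (what is proved, stated in full; the proofs are below) =====
def Claim_equal_findDifferenceOddEven : Prop := ∀ (arr : List Int), Dom_findDifferenceOddEven arr → Spec_findDifferenceOddEven arr (findDifferenceOddEven arr)

-- ===== LEMMAS AND PROOFS =====
theorem foldl_pair_sums (arr : List Int) : ∀ (so se : Int),
    (arr.foldl
      (fun (s : Int × Int) num =>
        if PySem.Int.mod num 2 == 0 then (s.1, s.2 + num) else (s.1 + num, s.2))
      (so, se))
    = (so + (arr.filter (fun x => PySem.Int.mod x 2 != 0)).sum,
       se + (arr.filter (fun x => PySem.Int.mod x 2 == 0)).sum) := by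
  induction arr with
  | nil => intro so se; simp
  | cons x xs ih =>
    intro so se
    cases hx : PySem.Int.mod x 2 == 0
    · have hx' : (PySem.Int.mod x 2 != 0) = true := by simp only [bne, hx, Bool.not_false]
      simp only [List.foldl_cons, List.filter_cons, hx, hx', Bool.false_eq_true, reduceIte,
        List.sum_cons, ih]
      rw [Prod.mk.injEq]
      constructor <;> ring
    · have hx' : (PySem.Int.mod x 2 != 0) = false := by simp only [bne, hx, Bool.not_true]
      simp only [List.foldl_cons, List.filter_cons, hx, hx', Bool.false_eq_true, reduceIte,
        List.sum_cons, ih]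
      rw [Prod.mk.injEq]
      constructor <;> ring

theorem sum_split (arr : List Int) :
    arr.sum = (arr.filter (fun x => PySem.Int.mod x 2 != 0)).sum
      + (arr.filter (fun x => PySem.Int.mod x 2 == 0)).sum := by
  induction arr with
  | nil => simp
  | cons x xs ih =>
    cases hx : PySem.Int.mod x 2 == 0
    · have hx' : (PySem.Int.mod x 2 != 0) = true := by simp only [bne, hx, Bool.not_false]
      simp only [List.filter_cons, hx, hx', Bool.false_eq_true, reduceIte, List.sum_cons, ih]
      ring
    · have hx' : (PySem.Int.mod x 2 != 0) = false := by simp only [bne, hx, Bool.not_true]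
      simp only [List.filter_cons, hx, hx', Bool.false_eq_true, reduceIte, List.sum_cons, ih]
      ring

-- ===== VERDICT =====
theorem findDifferenceOddEven_spec : Claim_equal_findDifferenceOddEven := by
  intro arr _
  unfold Spec_findDifferenceOddEven findDifferenceOddEven findDifferenceOddEven_alt
  rw [foldl_pair_sums arr 0 0, sum_split arr]
  ring
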